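-- pv_equiv track=rewrite | github.com/k-harada/AtCoder | ADT/20231025/F.py | solve
-- ===== SOURCE A (Python) =====
-- MOD = 998244353
--
-- def solve(n):
--     res = 0
--     m = len(str(n))
--     for i in range(1, m):
--         x = 9 * (10 ** (i - 1)) % MOD
--         res += (1 + x) * x // 2
--         res %= MOD
--     last = (n - (10 ** (m - 1)) + 1) % MOD
--     res += (1 + last) * last // 2
--     res %= MOD
--     return res
-- ===== SOURCE B (Python) =====
-- MOD = 998244353
--
-- def solve(n):
--     # closed form instead of the digit-group loop; one reduction mod MOD at the end
--     m = len(str(n))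
--     full = (81 * (100 ** (m - 1) - 1) // 99 + (10 ** (m - 1) - 1)) // 2
--     last = n - 10 ** (m - 1) + 1
--     return (full + last * (last + 1) // 2) % MOD
-- ===== Notes on version B (the rewrite author's own statement) =====
-- stated objective: simpler
-- what changed: Replaced the per-digit-length loop of triangular numbers with a closed-form geometric-series formula (exact integer divisions by 99 and 2), reducing mod MOD only once at the end.
import Mathlib
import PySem

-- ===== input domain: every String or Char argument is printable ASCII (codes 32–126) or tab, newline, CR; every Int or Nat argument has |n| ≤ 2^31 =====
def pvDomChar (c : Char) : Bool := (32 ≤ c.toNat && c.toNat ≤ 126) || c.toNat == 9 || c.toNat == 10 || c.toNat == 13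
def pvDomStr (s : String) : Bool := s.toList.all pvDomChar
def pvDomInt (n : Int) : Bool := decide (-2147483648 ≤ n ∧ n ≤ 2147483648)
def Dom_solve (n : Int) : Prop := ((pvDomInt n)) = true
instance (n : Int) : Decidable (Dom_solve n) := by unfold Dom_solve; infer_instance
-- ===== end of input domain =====

-- B replaces A's per-digit-length loop by a closed-form geometric-series formula with exact
-- integer divisions, reducing mod MOD only once at the end (objective: simpler).

def pyMOD : Int := 998244353

-- ===== PORT A =====
-- exponents: i ≥ 1 inside range(1, m) and m ≥ 1 (str(n) is nonempty), so .toNat is exact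
def solve (n : Int) : Int :=
  let m : Int := PySem.Str.len (PySem.Int.toStr n)
  let res : Int := (PySem.List.pyRange 1 m 1).foldl
    (fun res i =>
      let x := PySem.Int.mod (9 * (10:Int) ^ (i - 1).toNat) pyMOD
      PySem.Int.mod (res + PySem.Int.floordiv ((1 + x) * x) 2) pyMOD) 0
  let last := PySem.Int.mod (n - (10:Int) ^ (m - 1).toNat + 1) pyMOD
  PySem.Int.mod (res + PySem.Int.floordiv ((1 + last) * last) 2) pyMOD

-- ===== PORT B =====
def solve_alt (n : Int) : Int :=
  let m : Int := PySem.Str.len (PySem.Int.toStr n)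
  let full := PySem.Int.floordiv
    (PySem.Int.floordiv (81 * ((100:Int) ^ (m - 1).toNat - 1)) 99 + ((10:Int) ^ (m - 1).toNat - 1)) 2
  let last := n - (10:Int) ^ (m - 1).toNat + 1
  PySem.Int.mod (full + PySem.Int.floordiv (last * (last + 1)) 2) pyMOD

-- ===== PRECONDITION & SPEC =====
def Spec_solve (n : Int) (out : Int) : Prop := out = solve_alt n
instance (n : Int) (out : Int) : Decidable (Spec_solve n out) := by unfold Spec_solve; infer_instance

-- ===== CLAIM (what is proved, stated in full; the proofs are below) =====
def Claim_equal_solve : Prop := ∀ (n : Int), Dom_solve n → Spec_solve n (solve n)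

-- ===== LEMMAS AND PROOFS =====

-- triangular number (1+y)*y//2 as A writes it
def triI (y : Int) : Int := PySem.Int.floordiv ((1 + y) * y) 2
-- base-100 repunit: (100^k - 1)/99
def uRep : Nat → Int
  | 0 => 0
  | k + 1 => 100 * uRep k + 1
-- exact sum of the full digit groups
def sTri : Nat → Int
  | 0 => 0
  | k + 1 => sTri k + triI (9 * 10 ^ k)

theorem pow_sub_one_eq (k : Nat) : (100:Int) ^ k - 1 = 99 * uRep k := by
  induction k with
  | zero => simp [uRep]
  | succ k ih => rw [pow_succ, uRep]; linarith

theorem tri_two (y : Int) : 2 * triI y = (1 + y) * y := by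
  obtain ⟨c, hc⟩ := Int.even_mul_succ_self y
  have h1 : (1 + y) * y = 2 * c := by linarith [hc, mul_comm y (y + 1)]
  rw [triI, h1, PySem.Int.floordiv_eq_ediv_of_pos (by norm_num),
    Int.mul_ediv_cancel_left c (by norm_num)]

theorem modp_self (y : Int) : Int.ModEq pyMOD (y % pyMOD) y :=
  Int.emod_emod_of_dvd y dvd_rfl

theorem tri_modeq (y : Int) : Int.ModEq pyMOD (triI (y % pyMOD)) (triI y) := by
  have h2 : 2 * triI (y % pyMOD) ≡ 2 * triI y [ZMOD pyMOD] := by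
    rw [tri_two, tri_two]
    exact ((modp_self y).add_left 1).mul (modp_self y)
  have h := Int.ModEq.cancel_left_div_gcd (m := pyMOD) (by norm_num [pyMOD]) h2
  have hg : pyMOD / (Int.gcd pyMOD 2 : Int) = pyMOD := by norm_num [pyMOD, Int.gcd]
  rwa [hg] at h

theorem loop_modeq (k : Nat) :
    Int.ModEq pyMOD
      ((List.range k).foldl
        (fun res j => (res + triI ((9 * (10:Int) ^ j) % pyMOD)) % pyMOD) 0)
      (sTri k) := by
  induction k with
  | zero => simp [sTri]
  | succ k ih =>
    rw [List.range_succ, List.foldl_append, List.foldl_cons, List.foldl_nil, sTri]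
    exact ((modp_self _).trans (ih.add (tri_modeq (9 * (10:Int) ^ k))))

theorem two_sTri (k : Nat) : 2 * sTri k = 81 * uRep k + ((10:Int) ^ k - 1) := by
  induction k with
  | zero => simp [sTri, uRep]
  | succ k ih =>
    have h100 : (100:Int) ^ k = 99 * uRep k + 1 := by linarith [pow_sub_one_eq k]
    have hsq : (10:Int) ^ k * (10:Int) ^ k = (100:Int) ^ k := by
      rw [← mul_pow]; norm_num
    rw [sTri, mul_add, tri_two, uRep, ih, pow_succ]
    linear_combination 81 * h100 + 81 * hsq

theorem closed_eq (k : Nat) :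
    PySem.Int.floordiv
      (PySem.Int.floordiv (81 * ((100:Int) ^ k - 1)) 99 + ((10:Int) ^ k - 1)) 2 = sTri k := by
  rw [pow_sub_one_eq]
  have h99 : PySem.Int.floordiv (81 * (99 * uRep k)) 99 = 81 * uRep k := by
    rw [PySem.Int.floordiv_eq_ediv_of_pos (by norm_num),
      show (81:Int) * (99 * uRep k) = 99 * (81 * uRep k) by ring,
      Int.mul_ediv_cancel_left _ (by norm_num)]
  rw [h99, show (81:Int) * uRep k + ((10:Int) ^ k - 1) = 2 * sTri k from (two_sTri k).symm,
    PySem.Int.floordiv_eq_ediv_of_pos (by norm_num),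
    Int.mul_ediv_cancel_left _ (by norm_num)]

-- ===== VERDICT (by name: the statement is the Claim_ definition above) =====
theorem solve_spec : Claim_equal_solve := by
  intro n _
  unfold Spec_solve solve solve_alt
  simp only [PySem.List.pyRange_one]
  set m : Int := PySem.Str.len (PySem.Int.toStr n) with hm
  set L : Int := n - (10:Int) ^ (m - 1).toNat + 1 with hL
  rw [List.foldl_map]
  simp only [add_sub_cancel_left, Int.toNat_natCast]
  have hT : ∀ y : Int, PySem.Int.floordiv ((1 + y) * y) 2 = triI y := fun _ => rfl
  rw [show L * (L + 1) = (1 + L) * L by ring, closed_eq]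
  simp only [hT, PySem.Int.mod_eq_emod_of_pos (show (0:Int) < pyMOD by norm_num [pyMOD])]
  exact (loop_modeq (m - 1).toNat).add (tri_modeq L)
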